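-- pv_equiv track=rewrite | github.com/cjiaoeth/Deep-learning-based-road-vectorisation-and-classification-with-a-painting-method | searching_space.py | add_hd_pixels_to_curve
-- ===== SOURCE A (Python) =====
-- import math
--
-- def neighbors(p,q):
--     flag = True
--     summation = (p[0]-q[0])**2 + (p[1]-q[1])**2
--     dist = math.sqrt(summation)
--     if dist > math.sqrt(2):
--         flag = False
--     else:
--         flag = True
--
--     return flag
--
-- def add_hd_pixels_to_curve(clusters,pixels_highdegree):
--     '''
--     the current gaps are mainly due to the missing of high-degree pixels
--     This functions is to add high-degree pixels to the curves as the starts and emds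
--
--     Parameters
--     ----------
--     clusters : TYPE
--         DESCRIPTION.
--     pixels_highdegree : TYPE
--         DESCRIPTION.
--
--     Returns
--     -------
--     None.
--
--     '''
--     new_clusters = []
--     for i in range(len(clusters)):
--         cluster = clusters[i].copy()
--         start = cluster[0]
--         end = cluster[-1]
--         for j in range(len(pixels_highdegree)):
--             pixel = pixels_highdegree[j]
--             flag1 = neighbors(start, pixel)
--             flag2 = neighbors(end, pixel)
--             if flag1:
--                 cluster.insert(0,pixel)
--             if flag2:
--                 cluster.insert(len(cluster),pixel)
--         new_clusters.append(cluster)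
--     return new_clusters
-- ===== SOURCE B (Python) =====
-- OFFSETS = [(-1, -1), (-1, 0), (-1, 1), (0, -1), (0, 0), (0, 1), (1, -1), (1, 0), (1, 1)]
--
-- def add_hd_pixels_to_curve(clusters, pixels_highdegree):
--     # Spatial hash: bucket pixel indices by their exact coordinate, once.
--     # A pixel is "neighbors" of an endpoint q iff its squared distance is <= 2,
--     # i.e. iff it lies in the 3x3 box around q, so each endpoint only queries
--     # the 9 cells around it instead of scanning every high-degree pixel.
--     grid = {}
--     for i, p in enumerate(pixels_highdegree):
--         grid.setdefault((p[0], p[1]), []).append(i)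
--
--     def near(q):
--         ids = []
--         for dx, dy in OFFSETS:
--             ids.extend(grid.get((q[0] + dx, q[1] + dy), []))
--         ids.sort()
--         return [pixels_highdegree[i] for i in ids]
--
--     new_clusters = []
--     for cluster in clusters:
--         front = near(cluster[0])
--         back = near(cluster[-1])
--         new_clusters.append(front[::-1] + list(cluster) + back)
--     return new_clusters
-- ===== Notes on version B (the rewrite author's own statement) =====
-- stated objective: faster
-- what changed: Instead of testing every high-degree pixel against both endpoints of every cluster (with O(len) front inserts), B builds one hash of pixel indices keyed by exact coordinate and, since neighbors() is exactly the 3x3 box for integer pixels, answers each endpoint query by looking up the 9 surrounding cells and sorting the few hit indices back into input order.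
import Mathlib
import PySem

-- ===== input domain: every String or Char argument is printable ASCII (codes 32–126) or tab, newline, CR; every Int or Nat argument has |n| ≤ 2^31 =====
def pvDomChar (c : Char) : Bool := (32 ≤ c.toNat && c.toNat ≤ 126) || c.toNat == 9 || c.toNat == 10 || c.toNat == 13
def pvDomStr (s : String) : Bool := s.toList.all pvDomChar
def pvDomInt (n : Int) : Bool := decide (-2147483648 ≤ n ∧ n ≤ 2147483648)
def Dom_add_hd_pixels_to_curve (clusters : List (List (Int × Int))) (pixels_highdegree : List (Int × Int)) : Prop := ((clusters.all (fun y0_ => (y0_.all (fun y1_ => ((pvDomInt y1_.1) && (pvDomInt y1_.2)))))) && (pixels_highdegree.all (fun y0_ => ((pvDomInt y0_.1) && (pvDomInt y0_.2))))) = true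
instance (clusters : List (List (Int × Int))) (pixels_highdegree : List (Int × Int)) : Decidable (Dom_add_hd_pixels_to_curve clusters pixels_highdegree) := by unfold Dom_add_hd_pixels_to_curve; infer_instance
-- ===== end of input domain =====

-- B replaces A's scan of every high-degree pixel per cluster endpoint by a spatial hash of
-- pixel indices keyed by exact coordinate, queried on the 9 cells around each endpoint
-- (objective: faster).


-- ===== PORT A =====
def neighbors (p q : Int × Int) : Bool :=
  -- summation is a nonnegative integer; `math.sqrt(summation) > math.sqrt(2)` on floats
  -- (correctly rounded, monotone) holds exactly when summation > 2, ported as that test.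
  let summation : Int := (p.1 - q.1) ^ 2 + (p.2 - q.2) ^ 2
  if summation > 2 then false else true

def add_hd_pixels_to_curve (clusters : List (List (Int × Int))) (pixels_highdegree : List (Int × Int)) : List (List (Int × Int)) :=
  clusters.foldl (fun new_clusters cl =>
    -- cluster = clusters[i].copy(); start = cluster[0]; end = cluster[-1] (Pre_ excludes the empty clusters on which Python raises)
    let start := PySem.List.pyGetD cl 0 (0, 0)
    let stop := PySem.List.pyGetD cl (-1) (0, 0)
    let cluster := pixels_highdegree.foldl (fun cluster pixel =>
      let flag1 := neighbors start pixel
      let flag2 := neighbors stop pixel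
      -- cluster.insert(0, pixel) is exactly cons; cluster.insert(len(cluster), pixel) is exactly append
      let cluster := if flag1 then pixel :: cluster else cluster
      let cluster := if flag2 then cluster ++ [pixel] else cluster
      cluster) cl
    new_clusters ++ [cluster]) []

-- ===== PORT B =====
def pvOffsets : List (Int × Int) := [(-1, -1), (-1, 0), (-1, 1), (0, -1), (0, 0), (0, 1), (1, -1), (1, 0), (1, 1)]

-- grid.setdefault((p[0], p[1]), []).append(i) over enumerate(pixels_highdegree)
def pvGrid (pixels : List (Int × Int)) : PySem.Dict (Int × Int) (List Int) :=
  (PySem.List.enumerate pixels).foldl (fun g ip => g.modify ip.2 [] (· ++ [ip.1])) PySem.Dict.empty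

def pvNear (grid : PySem.Dict (Int × Int) (List Int)) (pixels : List (Int × Int)) (q : Int × Int) : List (Int × Int) :=
  let ids := pvOffsets.foldl (fun ids d => ids ++ grid.getD (q.1 + d.1, q.2 + d.2) []) []
  let ids := PySem.List.sorted ids (fun i => i) false
  ids.map (fun i => PySem.List.pyGetD pixels i (0, 0))    -- every id is an in-range index of pixels

def add_hd_pixels_to_curve_alt (clusters : List (List (Int × Int))) (pixels_highdegree : List (Int × Int)) : List (List (Int × Int)) :=
  let grid := pvGrid pixels_highdegree
  clusters.foldl (fun acc cluster =>
    let front := pvNear grid pixels_highdegree (PySem.List.pyGetD cluster 0 (0, 0))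
    let back := pvNear grid pixels_highdegree (PySem.List.pyGetD cluster (-1) (0, 0))
    acc ++ [front.reverse ++ cluster ++ back]) []

-- ===== PRECONDITION & SPEC =====
-- Pre_ excludes exactly the inputs on which Python A raises: `cluster[0]` is an IndexError on an empty cluster.
def Pre_add_hd_pixels_to_curve (clusters : List (List (Int × Int))) (pixels_highdegree : List (Int × Int)) : Prop :=
  ∀ cl ∈ clusters, cl ≠ []
instance (clusters : List (List (Int × Int))) (pixels_highdegree : List (Int × Int)) : Decidable (Pre_add_hd_pixels_to_curve clusters pixels_highdegree) := by unfold Pre_add_hd_pixels_to_curve; infer_instance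

def pvWitness_add_hd_pixels_to_curve : (List (List (Int × Int))) × (List (Int × Int)) :=
  ([[(0, 0), (3, 3)]], [(1, 1), (5, 5), (3, 2)])

def Spec_add_hd_pixels_to_curve (clusters : List (List (Int × Int))) (pixels_highdegree : List (Int × Int)) (out : List (List (Int × Int))) : Prop := out = add_hd_pixels_to_curve_alt clusters pixels_highdegree
instance (clusters : List (List (Int × Int))) (pixels_highdegree : List (Int × Int)) (out : List (List (Int × Int))) : Decidable (Spec_add_hd_pixels_to_curve clusters pixels_highdegree out) := by unfold Spec_add_hd_pixels_to_curve; infer_instance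

-- ===== CLAIM (what is proved, stated in full; the proofs are below) =====
def Claim_equal_add_hd_pixels_to_curve : Prop := ∀ (clusters : List (List (Int × Int))) (pixels_highdegree : List (Int × Int)), Dom_add_hd_pixels_to_curve clusters pixels_highdegree → Pre_add_hd_pixels_to_curve clusters pixels_highdegree → Spec_add_hd_pixels_to_curve clusters pixels_highdegree (add_hd_pixels_to_curve clusters pixels_highdegree)

-- ===== LEMMAS AND PROOFS =====

-- A's inner loop: pixels near the start pile up in front reversed, pixels near the end append in order.
lemma pv_innerA (s e : Int × Int) (px : List (Int × Int)) : ∀ init : List (Int × Int),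
    px.foldl (fun cluster pixel =>
      let flag1 := neighbors s pixel
      let flag2 := neighbors e pixel
      let cluster := if flag1 then pixel :: cluster else cluster
      let cluster := if flag2 then cluster ++ [pixel] else cluster
      cluster) init
    = (px.filter (fun p => neighbors s p)).reverse ++ init ++ px.filter (fun p => neighbors e p) := by
  induction px with
  | nil => intro init; simp
  | cons p t ih =>
    intro init
    simp only [List.foldl_cons, List.filter_cons]
    rw [ih]
    by_cases h1 : neighbors s p <;> by_cases h2 : neighbors e p <;>
      simp [h1, h2, List.append_assoc]

-- the grid's bucket at c holds exactly the indices of the pixels equal to c, in order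
lemma pv_grid_getD (px : List (Int × Int)) (c : Int × Int) :
    (pvGrid px).getD c []
      = ((PySem.List.enumerate px).filter (fun ip => ip.2 == c)).map (·.1) := by
  unfold pvGrid
  have h := PySem.Dict.getD_foldl_modify_append ((PySem.List.enumerate px).map (fun ip => (ip.2, ip.1))) (PySem.Dict.empty) c
  rw [List.foldl_map] at h
  simp only [h, PySem.Dict.getD_empty, List.filter_map, List.map_map]
  rfl

-- two filters by disjoint key tests concatenate, up to permutation, to the filter by either test
lemma pv_filter_cons_perm {α κ : Type} [BEq κ] [LawfulBEq κ] (key : α → κ) (c : κ) (cs : List κ) (hc : c ∉ cs) :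
    ∀ l : List α, (l.filter (fun x => key x == c) ++ l.filter (fun x => cs.contains (key x))).Perm
      (l.filter (fun x => (c :: cs).contains (key x))) := by
  intro l
  induction l with
  | nil => simp
  | cons x t ih =>
    by_cases h1 : key x = c
    · simpa [List.filter_cons, List.contains_eq_mem, h1, hc] using ih.cons x
    · by_cases h2 : key x ∈ cs
      · simp only [List.filter_cons, beq_iff_eq, h1, if_false, List.contains_eq_mem, h2,
          decide_true, if_true, List.mem_cons, or_true]
        simpa [List.contains_eq_mem] using (List.perm_middle).trans (ih.cons x)
      · have h3 : ¬ (key x ∈ c :: cs) := by simp [h1, h2]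
        simp only [List.filter_cons, beq_iff_eq, h1, if_false, List.contains_eq_mem, h2, h3,
          decide_false, Bool.false_eq_true]
        simpa [List.contains_eq_mem] using ih

-- bucket lists over distinct keys concatenate to the filter by key membership
lemma pv_flatMap_filter_perm {α κ : Type} [BEq κ] [LawfulBEq κ] (key : α → κ) :
    ∀ (cs : List κ), cs.Nodup → ∀ l : List α,
      (cs.flatMap (fun c => l.filter (fun x => key x == c))).Perm
        (l.filter (fun x => cs.contains (key x))) := by
  intro cs
  induction cs with
  | nil => intro _ l; simp
  | cons c cs ih =>
    intro hnd l
    have hc : c ∉ cs := (List.nodup_cons.mp hnd).1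
    have h1 := (ih (List.nodup_cons.mp hnd).2 l).append_left (l.filter (fun x => key x == c))
    have h2 := h1.trans (pv_filter_cons_perm key c cs hc l)
    simpa using h2

lemma pv_flatMap_filter_perm' {α κ : Type} [BEq κ] [LawfulBEq κ] (key : α → κ) (cs : List κ)
    (hnd : cs.Nodup) (m : α → Bool) (hm : ∀ x, m x = true ↔ key x ∈ cs) (l : List α) :
      (cs.flatMap (fun c => l.filter (fun x => key x == c))).Perm (l.filter m) := by
  have h := pv_flatMap_filter_perm key cs hnd l
  have heq : l.filter (fun x => cs.contains (key x)) = l.filter m := by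
    apply List.filter_congr
    intro x _
    have := hm x
    cases hmx : m x <;> simp_all [List.contains_eq_mem]
  rwa [heq] at h

-- membership in the 9-cell box around q is exactly A's `neighbors q ·` test
lemma pv_mem_cells_iff (q p : Int × Int) :
    (p ∈ pvOffsets.map (fun d => (q.1 + d.1, q.2 + d.2))) ↔ neighbors q p = true := by
  have hbox : (q.1 - p.1) ^ 2 + (q.2 - p.2) ^ 2 ≤ 2 ↔
      (-1 ≤ p.1 - q.1 ∧ p.1 - q.1 ≤ 1 ∧ -1 ≤ p.2 - q.2 ∧ p.2 - q.2 ≤ 1) := by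
    constructor
    · intro h
      refine ⟨?_, ?_, ?_, ?_⟩ <;> nlinarith [sq_nonneg (q.1 - p.1), sq_nonneg (q.2 - p.2)]
    · rintro ⟨h1, h2, h3, h4⟩; nlinarith
  simp only [neighbors, gt_iff_lt, ite_eq_right_iff, pvOffsets, List.map_cons,
    List.map_nil, List.mem_cons, List.not_mem_nil, or_false]
  constructor
  · intro h
    rcases h with h|h|h|h|h|h|h|h|h <;> (rw [h]; simp)
  · intro h
    have h2 : (q.1 - p.1) ^ 2 + (q.2 - p.2) ^ 2 ≤ 2 := by
      by_contra hgt
      simp at h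
      omega
    have := hbox.mp h2
    obtain ⟨a1, a2, b1, b2⟩ := this
    have hp : p = (q.1 + (p.1 - q.1), q.2 + (p.2 - q.2)) := by
      ext <;> simp
    interval_cases h1 : (p.1 - q.1) <;> interval_cases h2 : (p.2 - q.2) <;>
      simp_all
lemma pv_cells_nodup (q : Int × Int) : (pvOffsets.map (fun d => (q.1 + d.1, q.2 + d.2))).Nodup := by
  apply List.Nodup.map
  · intro a b hab
    simp only [Prod.mk.injEq] at hab
    ext
    · omega
    · omega
  · decide

lemma pv_pairwise_fst_enumerate (px : List (Int × Int)) :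
    (PySem.List.enumerate px).Pairwise (fun a b => a.1 < b.1) := by
  have h := PySem.List.map_fst_enumerate px (0 : Int)
  have h2 := PySem.List.pairwise_lt_pyRange_one (0 : Int) (0 + px.length)
  rw [← h] at h2
  exact (List.pairwise_map.mp h2)

lemma pv_enum_get {P : Type} : ∀ (px : List P) (s : Int) (ip : Int × P), ip ∈ PySem.List.enumerate px s →
    ∃ k : Nat, ip.1 = s + k ∧ px[k]? = some ip.2 := by
  intro px
  induction px with
  | nil => intro s ip h; simp [PySem.List.enumerate_nil] at h
  | cons x t ih =>
    intro s ip h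
    rw [PySem.List.enumerate_cons] at h
    rcases List.mem_cons.mp h with h | h
    · exact ⟨0, by simp [h], by simp [h]⟩
    · obtain ⟨k, hk1, hk2⟩ := ih (s + 1) ip h
      exact ⟨k + 1, by push_cast; omega, by simpa using hk2⟩

-- indexing pixels back through kept enumerate indices recovers the plain filter
lemma pv_map_pyGetD_filter (px : List (Int × Int)) (f : (Int × Int) → Bool) :
    ((PySem.List.enumerate px).filter (fun ip => f ip.2)).map (fun ip => PySem.List.pyGetD px ip.1 (0, 0))
      = px.filter f := by
  have hmc : ((PySem.List.enumerate px).filter (fun ip => f ip.2)).map (fun ip => PySem.List.pyGetD px ip.1 (0, 0))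
      = ((PySem.List.enumerate px).filter (fun ip => f ip.2)).map (fun ip => ip.2) := by
    apply List.map_congr_left
    intro ip hip
    have hmem : ip ∈ PySem.List.enumerate px 0 := List.mem_of_mem_filter hip
    obtain ⟨k, hk1, hk2⟩ := pv_enum_get px 0 ip hmem
    have hki : ip.1 = (k : Int) := by omega
    rw [hki, PySem.List.pyGetD_natCast]
    simp [List.getD, hk2]
  rw [hmc]
  have h2 : px.filter f = ((PySem.List.enumerate px).map (·.2)).filter f := by
    rw [PySem.List.map_snd_enumerate]
  rw [h2, List.filter_map]
  rfl

-- the spatial-hash query returns exactly A's filter, in original pixel order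
lemma pv_near_eq (px : List (Int × Int)) (q : Int × Int) :
    pvNear (pvGrid px) px q = px.filter (fun p => neighbors q p) := by
  unfold pvNear
  rw [PySem.List.foldl_append_eq_flatMap]
  simp only [List.nil_append, pv_grid_getD]
  have hflat : pvOffsets.flatMap
        (fun d => ((PySem.List.enumerate px).filter (fun ip => ip.2 == (q.1 + d.1, q.2 + d.2))).map (·.1))
      = (((pvOffsets.map (fun d => (q.1 + d.1, q.2 + d.2))).flatMap
          (fun c => (PySem.List.enumerate px).filter (fun ip => ip.2 == c))).map (·.1)) := by
    rw [List.map_flatMap, List.flatMap_map]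
  rw [hflat]
  have hperm := (pv_flatMap_filter_perm' (fun ip : Int × (Int × Int) => ip.2)
      (pvOffsets.map (fun d => (q.1 + d.1, q.2 + d.2))) (pv_cells_nodup q)
      (fun ip => neighbors q ip.2) (fun ip => pv_mem_cells_iff q ip.2 |>.symm)
      (PySem.List.enumerate px)).map (·.1)
  have hpw : (((PySem.List.enumerate px).filter (fun ip => neighbors q ip.2)).map (·.1)).Pairwise
      (fun a b => (fun i : Int => i) a < (fun i : Int => i) b) := by
    apply List.pairwise_map.mpr
    exact (pv_pairwise_fst_enumerate px).filter _
  have hs := PySem.List.sorted_eq_of_perm_of_pairwise_lt _ _ (fun i : Int => i) hperm.symm hpw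
  rw [hs]
  rw [List.map_map]
  exact pv_map_pyGetD_filter px (fun p => neighbors q p)

-- ===== VERDICT (by name: the statement is the Claim_ definition above) =====
theorem add_hd_pixels_to_curve_spec : Claim_equal_add_hd_pixels_to_curve := by
  intro clusters pixels _ _
  show add_hd_pixels_to_curve clusters pixels = add_hd_pixels_to_curve_alt clusters pixels
  unfold add_hd_pixels_to_curve add_hd_pixels_to_curve_alt
  rw [PySem.List.foldl_append_singleton_eq_map, PySem.List.foldl_append_singleton_eq_map]
  simp only [List.nil_append]
  apply List.map_congr_left
  intro cl _
  rw [pv_innerA, pv_near_eq, pv_near_eq]
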